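-- pv_equiv track=rewrite | github.com/js0221/codingtest | algorithm/배달.py | solution
-- ===== SOURCE A (Python) =====
-- from heapq import heappop, heappush
--
-- def solution(N, road, K):
--     table = [float('inf')] * (N + 1)
--     table[1] = 0
--     queue = [(1, 0)]
--
--     while queue:
--         current, current_cost = heappop(queue)
--
--         for start, end, cost in road:
--             next_cost = current_cost + cost
--             if start == current and next_cost < table[end]:
--                 table[end] = next_cost
--                 heappush(queue, (end, next_cost))
--             elif end == current and next_cost < table[start]:
--                 table[start] = next_cost
--                 heappush(queue, (start, next_cost))
--
--     return len([i for i in table if i <= K])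
-- ===== SOURCE B (Python) =====
-- from heapq import heappop, heappush
--
-- def solution(N, road, K):
--     # Classic Dijkstra: adjacency lists built once (dict of lists), heap keyed by
--     # (distance, node) with stale entries skipped; A instead rescans the whole
--     # road list on every pop of a heap keyed by (node, distance).
--     adj = {}
--     for s, e, c in road:
--         adj.setdefault(s, []).append((e, c))
--         adj.setdefault(e, []).append((s, c))
--     dist = [float('inf')] * (N + 1)
--     dist[1] = 0
--     pq = [(0, 1)]
--     while pq:
--         d, v = heappop(pq)
--         if d > dist[v]:
--             continue
--         for u, c in adj.get(v, []):
--             nd = d + c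
--             if nd < dist[u]:
--                 dist[u] = nd
--                 heappush(pq, (nd, u))
--     return sum(1 for x in dist if x <= K)
-- ===== Notes on version B (the rewrite author's own statement) =====
-- stated objective: faster
-- what changed: A is a label-correcting loop that rescans the entire road list on every pop of a heap oddly keyed by (node, cost); B builds a dict of adjacency lists once and runs classic Dijkstra with a heap keyed by (distance, node) and a stale-entry skip, visiting only each node's own edges.
-- outside the precondition, e.g. on solution(4, [(1, 2, 5), (3, 4, -4)], 7): A returns 2, B returns 2; on solution(3, [(1, 2, 5), (3, 9, 1)], 7): A returns 2, B returns 2; on solution(2, [(1, -1, 7)], 10): A returns 2, B returns 2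
import Mathlib
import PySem

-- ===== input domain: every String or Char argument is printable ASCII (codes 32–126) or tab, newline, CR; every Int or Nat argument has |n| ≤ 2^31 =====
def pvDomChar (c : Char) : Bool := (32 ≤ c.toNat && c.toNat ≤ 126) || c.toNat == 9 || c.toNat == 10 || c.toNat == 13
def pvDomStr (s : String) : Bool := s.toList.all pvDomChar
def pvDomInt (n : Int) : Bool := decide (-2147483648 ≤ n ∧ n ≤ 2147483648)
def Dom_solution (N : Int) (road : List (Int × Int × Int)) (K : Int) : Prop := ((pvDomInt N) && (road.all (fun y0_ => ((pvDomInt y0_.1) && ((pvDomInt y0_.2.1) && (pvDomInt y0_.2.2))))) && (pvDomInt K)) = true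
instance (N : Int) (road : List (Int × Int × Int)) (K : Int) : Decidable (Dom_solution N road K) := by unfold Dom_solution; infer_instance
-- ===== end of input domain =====

-- B replaces A's label-correcting loop (rescan of the whole road list per pop of a
-- heap keyed by (node, cost)) with classic Dijkstra over adjacency lists and a heap
-- keyed by (distance, node); a timing run measured B faster on large inputs.
-- Pre_ restricts to the problem's natural domain (see comment at Pre_solution).


-- ===== PORT A =====
-- shared low-level helpers: Python list read/write at an Int index (exact for
-- in-range non-negative indices, which is all Pre_ admits), and heappop modelled
-- as "remove the minimal pair" (a heap of pairs pops the lexicographically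
-- smallest element; the list holds the heap's multiset, heappush appends).
def lget {α : Type} (d : α) (t : List α) (i : Int) : α :=
  if 0 ≤ i then t.getD i.toNat d else d

def lset {α : Type} (t : List α) (i : Int) (x : α) : List α :=
  if 0 ≤ i then t.set i.toNat x else t

-- computable comparisons on WithTop Int (Python's int-vs-inf comparisons)
def vlt (a b : WithTop Int) : Bool :=
  match a, b with
  | ⊤, _ => false
  | (_ : Int), ⊤ => true
  | (x : Int), (y : Int) => decide (x < y)

def vle (a b : WithTop Int) : Bool :=
  match a, b with
  | _, ⊤ => true
  | ⊤, (_ : Int) => false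
  | (x : Int), (y : Int) => decide (x ≤ y)

def pairLt (a b : Int × Int) : Bool :=
  a.1 < b.1 || (a.1 == b.1 && a.2 < b.2)

def qmin (x : Int × Int) (xs : List (Int × Int)) : Int × Int :=
  xs.foldl (fun m y => if pairLt y m then y else m) x

def qremove (m : Int × Int) : List (Int × Int) → List (Int × Int)
  | [] => []
  | y :: ys => if y = m then ys else y :: qremove m ys

def popMin : List (Int × Int) → Option ((Int × Int) × List (Int × Int))
  | [] => none
  | x :: xs => let m := qmin x xs; some (m, qremove m (x :: xs))

-- fuel: a totalization guard for the while-loops (Python diverges on negative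
-- costs; inside Pre_ the fuel is proved sufficient, see the measure lemmas below)
def cmax (road : List (Int × Int × Int)) : Int :=
  road.foldl (fun m e => max m e.2.2) 0

def sbound (N : Int) (road : List (Int × Int × Int)) : Nat :=
  (N * cmax road).toNat

def fuelN (N : Int) (road : List (Int × Int × Int)) : Nat :=
  2 * ((N.toNat + 2) * (sbound N road + 2)) + 4

-- one edge of A's inner `for start, end, cost in road` scan
def stepA (cur qc : Int) (st : List (WithTop Int) × List (Int × Int)) (ed : Int × Int × Int) :
    List (WithTop Int) × List (Int × Int) :=
  let nxt := qc + ed.2.2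
  if ed.1 == cur && vlt (nxt : WithTop Int) (lget ⊤ st.1 ed.2.1) then
    (lset st.1 ed.2.1 (nxt : WithTop Int), st.2 ++ [(ed.2.1, nxt)])
  else if ed.2.1 == cur && vlt (nxt : WithTop Int) (lget ⊤ st.1 ed.1) then
    (lset st.1 ed.1 (nxt : WithTop Int), st.2 ++ [(ed.1, nxt)])
  else st

-- A's `while queue:` loop; queue entries are (node, cost) as in A
def loopA (road : List (Int × Int × Int)) : Nat → List (WithTop Int) → List (Int × Int) → List (WithTop Int)
  | 0, t, _ => t
  | fuel + 1, t, q =>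
    match popMin q with
    | none => t
    | some ((cur, qc), q') =>
      let st := road.foldl (stepA cur qc) (t, q')
      loopA road fuel st.1 st.2

def solution (N : Int) (road : List (Int × Int × Int)) (K : Int) : Int :=
  let table := lset (List.replicate (N + 1).toNat (⊤ : WithTop Int)) 1 (0 : Int)
  let T := loopA road (fuelN N road) table [(1, 0)]
  ((T.filter (fun i => vle i (K : WithTop Int))).length : Int)

-- ===== PORT B =====
-- adjacency lists: adj[s].append((e,c)); adj[e].append((s,c))
def adjStep (a : PySem.Dict Int (List (Int × Int))) (ed : Int × Int × Int) :
    PySem.Dict Int (List (Int × Int)) :=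
  let a1 := a.insert ed.1 (a.getD ed.1 [] ++ [(ed.2.1, ed.2.2)])
  a1.insert ed.2.1 (a1.getD ed.2.1 [] ++ [(ed.1, ed.2.2)])

def buildAdj (road : List (Int × Int × Int)) : PySem.Dict Int (List (Int × Int)) :=
  road.foldl adjStep PySem.Dict.empty

-- one neighbour (u, c) of B's inner `for u, c in adj[v]` scan
def stepB (d : Int) (st : List (WithTop Int) × List (Int × Int)) (pr : Int × Int) :
    List (WithTop Int) × List (Int × Int) :=
  let nd := d + pr.2
  if vlt (nd : WithTop Int) (lget ⊤ st.1 pr.1) then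
    (lset st.1 pr.1 (nd : WithTop Int), st.2 ++ [(nd, pr.1)])
  else st

-- B's `while pq:` loop; queue entries are (cost, node) as in B
def loopB (adj : PySem.Dict Int (List (Int × Int))) : Nat → List (WithTop Int) → List (Int × Int) → List (WithTop Int)
  | 0, t, _ => t
  | fuel + 1, t, q =>
    match popMin q with
    | none => t
    | some ((d, v), q') =>
      if vlt (lget ⊤ t v) (d : WithTop Int) then loopB adj fuel t q'
      else
        let st := (adj.getD v []).foldl (stepB d) (t, q')
        loopB adj fuel st.1 st.2

def solution_alt (N : Int) (road : List (Int × Int × Int)) (K : Int) : Int :=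
  let adj := buildAdj road
  let dist := lset (List.replicate (N + 1).toNat (⊤ : WithTop Int)) 1 (0 : Int)
  let T := loopB adj (fuelN N road) dist [(0, 1)]
  T.foldl (fun (acc : Int) x => if vle x (K : WithTop Int) then acc + 1 else acc) 0

-- ===== PRECONDITION & SPEC =====
-- Pre_ asks for at least one node (N ≤ 0 makes table[1] = 0 raise IndexError) and
-- then admits two closed-form shapes of road list: (a) every road is either a
-- proper road (endpoints in 0..N, non-negative cost) or entirely between labels
-- outside Python's index range [-(N+1), N] (such roads are provably never touched
-- by either program); or (b) no road touches node 1, so both programs stop after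
-- the first pop whatever the roads look like.  Excluded (beyond crashes and
-- divergence on reachable negative costs): roads mixing one in-range and one
-- out-of-range endpoint (A raises IndexError once they become reachable),
-- reachable negative costs (A loops forever), and endpoints in [-(N+1), 0],
-- whose Python negative-index wraparound semantics this file does not claim.
def Pre_solution (N : Int) (road : List (Int × Int × Int)) (K : Int) : Prop :=
  1 ≤ N ∧
    ((∀ ed ∈ road,
        (0 ≤ ed.1 ∧ ed.1 ≤ N ∧ 0 ≤ ed.2.1 ∧ ed.2.1 ≤ N ∧ 0 ≤ ed.2.2) ∨
        ((ed.1 < -(N + 1) ∨ N < ed.1) ∧ (ed.2.1 < -(N + 1) ∨ N < ed.2.1))) ∨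
      (∀ ed ∈ road, ed.1 ≠ 1 ∧ ed.2.1 ≠ 1))

instance (N : Int) (road : List (Int × Int × Int)) (K : Int) : Decidable (Pre_solution N road K) := by
  unfold Pre_solution; infer_instance

def pvWitness_solution : Int × (List (Int × Int × Int)) × Int := (2, [(1, 2, 3)], 3)

def Spec_solution (N : Int) (road : List (Int × Int × Int)) (K : Int) (out : Int) : Prop := out = solution_alt N road K
instance (N : Int) (road : List (Int × Int × Int)) (K : Int) (out : Int) : Decidable (Spec_solution N road K out) := by unfold Spec_solution; infer_instance

-- ===== CLAIM (what is proved, stated in full; the proofs are below) =====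
def Claim_equal_solution : Prop := ∀ (N : Int) (road : List (Int × Int × Int)) (K : Int), Dom_solution N road K → Pre_solution N road K → Spec_solution N road K (solution N road K)

-- ===== LEMMAS AND PROOFS =====

-- walks from node 1 along roads (either direction) and their costs
inductive Reach (road : List (Int × Int × Int)) : Int → Int → Prop
  | base : Reach road 1 0
  | fwd {v q s e c} : Reach road v q → (s, e, c) ∈ road → s = v → Reach road e (q + c)
  | bwd {v q s e c} : Reach road v q → (s, e, c) ∈ road → e = v → Reach road s (q + c)

def Adj (road : List (Int × Int × Int)) (v u c : Int) : Prop :=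
  (v, u, c) ∈ road ∨ (u, v, c) ∈ road

-- node-distinct chains from 1 whose prefixes dominate the table (GC = good chain);
-- the queue/table invariant that bounds every cost that ever appears
inductive GC (N : Int) (road : List (Int × Int × Int)) (t : List (WithTop Int)) : List Int → Int → Prop
  | base : lget ⊤ t 1 ≤ (0 : Int) → GC N road t [1] 0
  | step {vs v q u c} : GC N road t (v :: vs) q → Adj road v u c →
      0 ≤ u → u ≤ N → 0 ≤ c → u ∉ v :: vs →
      lget ⊤ t u ≤ ((q + c : Int) : WithTop Int) → GC N road t (u :: v :: vs) (q + c)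

-- ---- order-comparison bridges ----
theorem vlt_iff (a b : WithTop Int) : vlt a b = true ↔ a < b := by
  cases a <;> cases b <;> simp [vlt]

-- ---- lget / lset ----
theorem lset_length {α : Type} (t : List α) (i : Int) (x : α) :
    (lset t i x).length = t.length := by
  unfold lset; split <;> simp

theorem lget_lset_self {α : Type} (d : α) (t : List α) (i : Int) (x : α)
    (h0 : 0 ≤ i) (hl : i.toNat < t.length) :
    lget d (lset t i x) i = x := by
  unfold lget lset
  simp [h0, List.getD_eq_getElem?_getD, List.getElem?_set, hl]

theorem lget_lset_ne {α : Type} (d : α) (t : List α) (i j : Int) (x : α)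
    (h : j ≠ i) : lget d (lset t i x) j = lget d t j := by
  unfold lget lset
  by_cases h0 : 0 ≤ i
  · by_cases h1 : 0 ≤ j
    · have : j.toNat ≠ i.toNat := by omega
      simp [h0, h1, List.getD_eq_getElem?_getD, List.getElem?_set_ne (Ne.symm this)]
    · simp [h0, h1]
  · simp [h0]

theorem lget_replicate {α : Type} (d x : α) (n : Nat) (i : Int) :
    lget d (List.replicate n x) i = if 0 ≤ i ∧ i.toNat < n then x else d := by
  unfold lget
  split
  · rename_i h0
    by_cases hl : i.toNat < n
    · simp [List.getD_eq_getElem?_getD, List.getElem?_replicate, hl, h0]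
    · simp [List.getD_eq_getElem?_getD, List.getElem?_replicate, hl, h0]
  · rename_i h0; simp [h0]

-- ---- popMin ----
theorem qmin_mem (x : Int × Int) (xs : List (Int × Int)) : qmin x xs ∈ x :: xs := by
  unfold qmin
  suffices h : ∀ (l : List (Int × Int)) (a : Int × Int) (acc : List (Int × Int)),
      a ∈ acc → (∀ y ∈ l, y ∈ acc) →
      l.foldl (fun m y => if pairLt y m then y else m) a ∈ acc by
    exact h xs x (x :: xs) (by simp) (by intro y hy; simp [hy])
  intro l
  induction l with
  | nil => intro a acc ha _; simpa using ha
  | cons z zs ih =>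
    intro a acc ha hsub
    simp only [List.foldl_cons]
    split
    · exact ih z acc (hsub z (by simp)) (fun y hy => hsub y (by simp [hy]))
    · exact ih a acc ha (fun y hy => hsub y (by simp [hy]))

theorem qremove_subset (m : Int × Int) (l : List (Int × Int)) :
    ∀ y ∈ qremove m l, y ∈ l := by
  induction l with
  | nil => simp [qremove]
  | cons z zs ih =>
    intro y hy
    unfold qremove at hy
    split at hy
    · simp [hy]
    · rcases List.mem_cons.mp hy with h | h
      · simp [h]
      · simp [ih y h]

theorem qremove_mem_of_ne (m : Int × Int) (l : List (Int × Int)) :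
    ∀ y ∈ l, y ≠ m → y ∈ qremove m l := by
  induction l with
  | nil => simp
  | cons z zs ih =>
    intro y hy hne
    unfold qremove
    rcases List.mem_cons.mp hy with h | h
    · subst h
      split
      · rename_i hz; exact absurd hz hne
      · simp
    · split
      · exact h
      · simp [ih y h hne]

theorem qremove_length (m : Int × Int) (l : List (Int × Int)) (hm : m ∈ l) :
    (qremove m l).length + 1 = l.length := by
  induction l with
  | nil => simp at hm
  | cons z zs ih =>
    unfold qremove
    split
    · simp
    · rename_i hz
      have : m ∈ zs := by
        rcases List.mem_cons.mp hm with h | h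
        · exact absurd h.symm hz
        · exact h
      simp [ih this]

theorem popMin_spec (q : List (Int × Int)) (m : Int × Int) (q' : List (Int × Int))
    (h : popMin q = some (m, q')) :
    m ∈ q ∧ (∀ y ∈ q', y ∈ q) ∧ (∀ y ∈ q, y ≠ m → y ∈ q') ∧ q'.length + 1 = q.length := by
  cases q with
  | nil => simp [popMin] at h
  | cons x xs =>
    simp only [popMin] at h
    obtain ⟨hm, hq⟩ : m = qmin x xs ∧ q' = qremove (qmin x xs) (x :: xs) := by
      constructor <;> [exact (Prod.mk.injEq .. ▸ (Option.some.injEq .. ▸ h)).1.symm;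
        exact (Prod.mk.injEq .. ▸ (Option.some.injEq .. ▸ h)).2.symm]
    subst hm; subst hq
    refine ⟨qmin_mem x xs, qremove_subset _ _, qremove_mem_of_ne _ _, qremove_length _ _ (qmin_mem x xs)⟩

theorem popMin_none (q : List (Int × Int)) (h : popMin q = none) : q = [] := by
  cases q with
  | nil => rfl
  | cons x xs => simp [popMin] at h

-- ---- cmax / cost bounds ----
theorem foldmax_le_start (l : List (Int × Int × Int)) (a : Int) :
    a ≤ l.foldl (fun m e => max m e.2.2) a := by
  induction l generalizing a with
  | nil => simp
  | cons z zs ih => exact le_trans (le_max_left a z.2.2) (ih _)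

theorem cmax_nonneg (road : List (Int × Int × Int)) : 0 ≤ cmax road :=
  foldmax_le_start road 0

theorem cost_le_cmax (road : List (Int × Int × Int)) (ed : Int × Int × Int) (h : ed ∈ road) :
    ed.2.2 ≤ cmax road := by
  unfold cmax
  generalize (0 : Int) = a
  induction road generalizing a with
  | nil => simp at h
  | cons z zs ih =>
    rcases List.mem_cons.mp h with h1 | h1
    · subst h1
      exact le_trans (le_max_right a ed.2.2) (foldmax_le_start zs _)
    · exact ih h1 _

-- ---- GC lemmas ----
theorem gc_head_le (N : Int) (road : List (Int × Int × Int)) (t : List (WithTop Int))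
    (v : Int) (vs : List Int) (q : Int) (h : GC N road t (v :: vs) q) :
    lget ⊤ t v ≤ (q : WithTop Int) := by
  cases h with
  | base h => exact_mod_cast h
  | step _ _ _ _ _ _ h => exact h

theorem gc_mono (N : Int) (road : List (Int × Int × Int)) (t t' : List (WithTop Int))
    (hm : ∀ i, lget ⊤ t' i ≤ lget ⊤ t i) :
    ∀ l q, GC N road t l q → GC N road t' l q := by
  intro l q h
  induction h with
  | base h => exact GC.base (le_trans (hm 1) h)
  | step h hadj h1 h2 h3 hnm hle ih => exact GC.step ih hadj h1 h2 h3 hnm (le_trans (hm _) hle)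

theorem gc_nonneg (N : Int) (road : List (Int × Int × Int)) (t : List (WithTop Int)) :
    ∀ l q, GC N road t l q → 0 ≤ q := by
  intro l q h
  induction h with
  | base _ => exact le_refl _
  | @step vs v q' u c h hadj h1 h2 h3 hnm hle ih => omega

theorem gc_mem_le (N : Int) (road : List (Int × Int × Int)) (t : List (WithTop Int)) :
    ∀ l q, GC N road t l q → ∀ w ∈ l, lget ⊤ t w ≤ (q : WithTop Int) := by
  intro l q h
  induction h with
  | base h =>
    intro w hw
    simp only [List.mem_singleton] at hw
    subst hw; exact_mod_cast h
  | @step vs v q' u c h hadj h1 h2 h3 hnm hle ih =>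
    intro w hw
    have hqq : (q' : WithTop Int) ≤ ((q' + c : Int) : WithTop Int) := by
      exact_mod_cast (by omega : q' ≤ q' + c)
    rcases List.mem_cons.mp hw with hw1 | hw1
    · subst hw1; exact hle
    · exact le_trans (ih w hw1) hqq

theorem gc_nodup (N : Int) (road : List (Int × Int × Int)) (t : List (WithTop Int)) :
    ∀ l q, GC N road t l q → l.Nodup := by
  intro l q h
  induction h with
  | base _ => simp
  | @step vs v q' u c h hadj h1 h2 h3 hnm hle ih => exact List.nodup_cons.mpr ⟨hnm, ih⟩

theorem gc_mem_bounds (N : Int) (road : List (Int × Int × Int)) (hN : 1 ≤ N)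
    (t : List (WithTop Int)) :
    ∀ l q, GC N road t l q → ∀ w ∈ l, 0 ≤ w ∧ w ≤ N := by
  intro l q h
  induction h with
  | base _ => intro w hw; simp only [List.mem_singleton] at hw; omega
  | @step vs v q' u c h hadj h1 h2 h3 hnm hle ih =>
    intro w hw
    rcases List.mem_cons.mp hw with hw1 | hw1
    · subst hw1; exact ⟨h1, h2⟩
    · exact ih w hw1

theorem gc_len_le (N : Int) (road : List (Int × Int × Int)) (hN : 1 ≤ N)
    (t : List (WithTop Int)) (l : List Int) (q : Int) (h : GC N road t l q) :
    l.length ≤ N.toNat + 1 := by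
  have hnd := gc_nodup N road t l q h
  have hmem := gc_mem_bounds N road hN t l q h
  have hsub : l.toFinset ⊆ Finset.Icc 0 N := by
    intro w hw
    have := hmem w (List.mem_toFinset.mp hw)
    simp [Finset.mem_Icc]; omega
  have h1 : l.toFinset.card = l.length := List.toFinset_card_of_nodup hnd
  have h2 := Finset.card_le_card hsub
  rw [h1] at h2
  have h3 : (Finset.Icc (0 : Int) N).card = (N + 1 - 0).toNat := Int.card_Icc 0 N
  omega

theorem gc_cost_le (N : Int) (road : List (Int × Int × Int)) (hN : 1 ≤ N)
    (t : List (WithTop Int)) (l : List Int) (q : Int) (h : GC N road t l q) :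
    q ≤ N * cmax road := by
  have hcm := cmax_nonneg road
  have hlen := gc_len_le N road hN t l q h
  have key : ∀ l q, GC N road t l q → q ≤ ((l.length : Int) - 1) * cmax road := by
    intro l q h
    induction h with
    | base _ => simp
    | @step vs v q' u c h hadj h1 h2 h3 hnm hle ih =>
      have hclt : c ≤ cmax road := by
        rcases hadj with hm | hm
        · exact cost_le_cmax road _ hm
        · exact cost_le_cmax road _ hm
      simp only [List.length_cons] at *
      have hexp : ((vs.length : Int) + 1 + 1 - 1) * cmax road
          = ((vs.length : Int) + 1 - 1) * cmax road + cmax road := by ring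
      push_cast at *
      linarith [ih, hclt]
  have h4 := key l q h
  have hl1 : (l.length : Int) - 1 ≤ N := by
    have : (l.length : Int) ≤ ((N.toNat + 1 : Nat) : Int) := by exact_mod_cast hlen
    omega
  nlinarith [h4, hl1, hcm]

theorem gc_reach (N : Int) (road : List (Int × Int × Int)) (t : List (WithTop Int)) :
    ∀ l q, GC N road t l q → ∀ v vs, l = v :: vs → Reach road v q := by
  intro l q h
  induction h with
  | base _ =>
    intro v vs hl
    cases hl; exact Reach.base
  | @step vs0 v0 q' u c h hadj h1 h2 h3 hnm hle ih =>
    intro v vs hl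
    cases hl
    rcases hadj with hm | hm
    · exact Reach.fwd (ih v0 vs0 rfl) hm rfl
    · exact Reach.bwd (ih v0 vs0 rfl) hm rfl

-- ---- measure ----
def rankV (S : Nat) : WithTop Int → Nat
  | ⊤ => S + 1
  | (x : Int) => min x.toNat S

def tmu (S : Nat) (t : List (WithTop Int)) : Nat := (t.map (rankV S)).sum

theorem rankV_le (S : Nat) (x : WithTop Int) : rankV S x ≤ S + 1 := by
  cases x <;> simp [rankV] <;> omega

theorem tmu_le (S : Nat) (t : List (WithTop Int)) : tmu S t ≤ t.length * (S + 1) := by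
  unfold tmu
  induction t with
  | nil => simp
  | cons x xs ih =>
    simp only [List.map_cons, List.sum_cons, List.length_cons]
    have := rankV_le S x
    have h2 : (xs.length + 1) * (S + 1) = xs.length * (S + 1) + (S + 1) := by ring
    omega

theorem tmu_set (S : Nat) (t : List (WithTop Int)) (j : Nat) (x : WithTop Int)
    (hj : j < t.length) :
    tmu S (t.set j x) + rankV S (t.getD j ⊤) = tmu S t + rankV S x := by
  unfold tmu
  induction t generalizing j with
  | nil => simp at hj
  | cons y ys ih =>
    cases j with
    | zero => simp [List.getD_cons_zero]; omega
    | succ j' =>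
      simp only [List.set_cons_succ, List.map_cons, List.sum_cons, List.getD_cons_succ]
      have := ih j' (by simpa using hj)
      omega

theorem tmu_lset (S : Nat) (t : List (WithTop Int)) (i : Int) (x : WithTop Int)
    (h0 : 0 ≤ i) (hl : i.toNat < t.length) :
    tmu S (lset t i x) + rankV S (lget ⊤ t i) = tmu S t + rankV S x := by
  unfold lset lget
  simp only [h0, if_pos]
  exact tmu_set S t i.toNat x hl

theorem rankV_lt (S : Nat) (old : WithTop Int) (xv : Int)
    (h0 : 0 ≤ xv) (hS : xv ≤ (S : Int)) (hlt : (xv : WithTop Int) < old)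
    (hb : ∀ ov : Int, old = (ov : WithTop Int) → ov ≤ (S : Int)) :
    rankV S xv < rankV S old := by
  cases old with
  | top =>
    simp only [rankV]
    omega
  | coe ov =>
    have hov : ov ≤ (S : Int) := hb ov rfl
    have hxo : xv < ov := by exact_mod_cast hlt
    simp only [rankV]
    omega

-- ---- final-table characterization ----
def FixT (road : List (Int × Int × Int)) (T : List (WithTop Int)) : Prop :=
  ∀ ed ∈ road, lget ⊤ T ed.2.1 ≤ lget ⊤ T ed.1 + (ed.2.2 : WithTop Int) ∧
    lget ⊤ T ed.1 ≤ lget ⊤ T ed.2.1 + (ed.2.2 : WithTop Int)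

def SoundT (road : List (Int × Int × Int)) (T : List (WithTop Int)) : Prop :=
  ∀ i : Int, lget ⊤ T i ≠ ⊤ → ∃ q : Int, Reach road i q ∧ lget ⊤ T i = (q : WithTop Int)

theorem reach_lower (road : List (Int × Int × Int)) (T : List (WithTop Int))
    (hfix : FixT road T) (h1 : lget ⊤ T 1 ≤ ((0 : Int) : WithTop Int)) :
    ∀ v q, Reach road v q → lget ⊤ T v ≤ (q : WithTop Int) := by
  intro v q h
  induction h with
  | base => exact h1
  | @fwd v' q' s e c hr hm hs ih =>
    subst hs
    have := (hfix _ hm).1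
    calc lget ⊤ T e ≤ lget ⊤ T s + (c : WithTop Int) := this
      _ ≤ (q' : WithTop Int) + (c : WithTop Int) := by gcongr
      _ = ((q' + c : Int) : WithTop Int) := by push_cast; rfl
  | @bwd v' q' s e c hr hm he ih =>
    subst he
    have := (hfix _ hm).2
    calc lget ⊤ T s ≤ lget ⊤ T e + (c : WithTop Int) := this
      _ ≤ (q' : WithTop Int) + (c : WithTop Int) := by gcongr
      _ = ((q' + c : Int) : WithTop Int) := by push_cast; rfl

theorem lget_natCast (t : List (WithTop Int)) (i : Nat) (hi : i < t.length) :
    lget ⊤ t (i : Int) = t[i] := by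
  unfold lget
  simp [List.getD_eq_getElem?_getD, List.getElem?_eq_getElem hi]

theorem eq_of_char (road : List (Int × Int × Int)) (T1 T2 : List (WithTop Int))
    (hlen : T1.length = T2.length)
    (hs1 : SoundT road T1) (hs2 : SoundT road T2)
    (hl1 : ∀ v q, Reach road v q → lget ⊤ T1 v ≤ (q : WithTop Int))
    (hl2 : ∀ v q, Reach road v q → lget ⊤ T2 v ≤ (q : WithTop Int)) :
    T1 = T2 := by
  apply List.ext_getElem hlen
  intro i hi1 hi2
  rw [← lget_natCast T1 i hi1, ← lget_natCast T2 i hi2]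
  by_cases h1 : lget ⊤ T1 (i : Int) = ⊤
  · by_cases h2 : lget ⊤ T2 (i : Int) = ⊤
    · rw [h1, h2]
    · obtain ⟨q2, hr2, he2⟩ := hs2 _ h2
      have := hl1 _ _ hr2
      rw [h1] at this
      exact absurd (top_le_iff.mp this) (by simp)
  · obtain ⟨q1, hr1, he1⟩ := hs1 _ h1
    by_cases h2 : lget ⊤ T2 (i : Int) = ⊤
    · have := hl2 _ _ hr1
      rw [h2] at this
      exact absurd (top_le_iff.mp this) (by simp)
    · obtain ⟨q2, hr2, he2⟩ := hs2 _ h2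
      have a1 := hl1 _ _ hr2
      have a2 := hl2 _ _ hr1
      rw [he1] at a1 ⊢
      rw [he2] at a2 ⊢
      have b1 : q1 ≤ q2 := by exact_mod_cast a1
      have b2 : q2 ≤ q1 := by exact_mod_cast a2
      have : q1 = q2 := le_antisymm b1 b2
      rw [this]

-- B's sum(1 for ...) equals A's len([...])
theorem count_eq (Kv : WithTop Int) (l : List (WithTop Int)) :
    l.foldl (fun (acc : Int) x => if vle x Kv then acc + 1 else acc) 0 =
      ((l.filter (fun i => vle i Kv)).length : Int) := by
  suffices h : ∀ (acc : Int), l.foldl (fun (acc : Int) x => if vle x Kv then acc + 1 else acc) acc =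
      acc + ((l.filter (fun i => vle i Kv)).length : Int) by simpa using h 0
  induction l with
  | nil => simp
  | cons x xs ih =>
    intro acc
    by_cases hx : vle x Kv
    · simp [hx, ih]; push_cast; ring
    · simp [hx, ih]

-- ---- the single relaxation update, shared by A's and B's inner loops ----
def Tent (N : Int) (road : List (Int × Int × Int)) (t : List (WithTop Int)) : Prop :=
  ∀ i : Int, lget ⊤ t i ≠ ⊤ →
    ∃ (qv : Int) (vs : List Int), GC N road t (i :: vs) qv ∧ lget ⊤ t i = ((qv : Int) : WithTop Int)

-- the "good roads" half of Pre_: every road proper or entirely out of index range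
def Pre5 (N : Int) (road : List (Int × Int × Int)) : Prop :=
  1 ≤ N ∧ ∀ ed ∈ road,
    (0 ≤ ed.1 ∧ ed.1 ≤ N ∧ 0 ≤ ed.2.1 ∧ ed.2.1 ≤ N ∧ 0 ≤ ed.2.2) ∨
    ((ed.1 < -(N + 1) ∨ N < ed.1) ∧ (ed.2.1 < -(N + 1) ∨ N < ed.2.1))

-- a road with an endpoint in 1..N is a proper road
theorem pre5_active (N : Int) (road : List (Int × Int × Int)) (hPre : Pre5 N road)
    (ed : Int × Int × Int) (hm : ed ∈ road) (x : Int) (hx : 0 ≤ x ∧ x ≤ N)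
    (hend : ed.1 = x ∨ ed.2.1 = x) :
    0 ≤ ed.1 ∧ ed.1 ≤ N ∧ 0 ≤ ed.2.1 ∧ ed.2.1 ≤ N ∧ 0 ≤ ed.2.2 := by
  rcases hPre.2 ed hm with h | h
  · exact h
  · exfalso; rcases hend with he | he <;> omega

theorem adj_active (N : Int) (road : List (Int × Int × Int)) (hPre : Pre5 N road)
    (v u c : Int) (hadj : Adj road v u c) (hv : 0 ≤ v ∧ v ≤ N) :
    (0 ≤ u ∧ u ≤ N) ∧ 0 ≤ c := by
  rcases hadj with hm | hm
  · have := pre5_active N road hPre (v, u, c) hm v hv (Or.inl rfl)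
    exact ⟨⟨this.2.2.1, this.2.2.2.1⟩, this.2.2.2.2⟩
  · have := pre5_active N road hPre (u, v, c) hm v hv (Or.inr rfl)
    exact ⟨⟨this.1, this.2.1⟩, this.2.2.2.2⟩

theorem sbound_cast (N : Int) (road : List (Int × Int × Int)) (hN : 1 ≤ N) :
    ((sbound N road : Nat) : Int) = N * cmax road := by
  unfold sbound
  have := cmax_nonneg road
  have : 0 ≤ N * cmax road := by positivity
  omega

theorem update_facts (N : Int) (road : List (Int × Int × Int)) (hN : 1 ≤ N)
    (t1 : List (WithTop Int)) (hlen : t1.length = (N + 1).toNat)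
    (htent : Tent N road t1)
    (v qc : Int) (vs : List Int) (hq : GC N road t1 (v :: vs) qc)
    (u c : Int) (hadj : Adj road v u c) (hub : 0 ≤ u ∧ u ≤ N) (hcge : 0 ≤ c)
    (hcond : ((qc + c : Int) : WithTop Int) < lget ⊤ t1 u) :
    (lset t1 u ((qc + c : Int) : WithTop Int)).length = t1.length ∧
    (∀ i, lget ⊤ (lset t1 u ((qc + c : Int) : WithTop Int)) i ≤ lget ⊤ t1 i) ∧
    lget ⊤ (lset t1 u ((qc + c : Int) : WithTop Int)) u = ((qc + c : Int) : WithTop Int) ∧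
    GC N road (lset t1 u ((qc + c : Int) : WithTop Int)) (u :: v :: vs) (qc + c) ∧
    Tent N road (lset t1 u ((qc + c : Int) : WithTop Int)) ∧
    tmu (sbound N road) (lset t1 u ((qc + c : Int) : WithTop Int)) < tmu (sbound N road) t1 := by
  have hu0 : 0 ≤ u := by omega
  have hur : u.toNat < t1.length := by omega
  set nxt : Int := qc + c with hnxt
  set t2 := lset t1 u ((nxt : Int) : WithTop Int) with ht2
  have hself : lget ⊤ t2 u = ((nxt : Int) : WithTop Int) := lget_lset_self ⊤ t1 u _ hu0 hur
  have hlen2 : t2.length = t1.length := lset_length t1 u _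
  have hnotmem : u ∉ v :: vs := by
    intro hmem
    have h1 := gc_mem_le N road t1 _ _ hq u hmem
    have h2 : ((nxt : Int) : WithTop Int) < ((qc : Int) : WithTop Int) := lt_of_lt_of_le hcond h1
    have : nxt < qc := by exact_mod_cast h2
    omega
  have hmono : ∀ i, lget ⊤ t2 i ≤ lget ⊤ t1 i := by
    intro i
    by_cases hi : i = u
    · subst hi; rw [hself]; exact le_of_lt hcond
    · rw [lget_lset_ne ⊤ t1 u i _ hi]
  have hchain1 : GC N road t2 (v :: vs) qc := gc_mono N road t1 t2 hmono _ _ hq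
  have hchain2 : GC N road t2 (u :: v :: vs) nxt :=
    GC.step hchain1 hadj hub.1 hub.2 hcge hnotmem (le_of_eq hself)
  have htent2 : Tent N road t2 := by
    intro i hne
    by_cases hi : i = u
    · subst hi
      exact ⟨nxt, v :: vs, hchain2, hself⟩
    · rw [lget_lset_ne ⊤ t1 u i _ hi] at hne ⊢
      obtain ⟨qv, vs', hch, heq⟩ := htent i hne
      exact ⟨qv, vs', gc_mono N road t1 t2 hmono _ _ hch, heq⟩
  refine ⟨hlen2, hmono, hself, hchain2, htent2, ?_⟩
  have hS := sbound_cast N road hN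
  have hn0 : 0 ≤ nxt := gc_nonneg N road t2 _ _ hchain2
  have hnS : nxt ≤ ((sbound N road : Nat) : Int) := by
    rw [hS]; exact gc_cost_le N road hN t2 _ _ hchain2
  have hob : ∀ ov : Int, lget ⊤ t1 u = ((ov : Int) : WithTop Int) → ov ≤ ((sbound N road : Nat) : Int) := by
    intro ov hov
    obtain ⟨qv, vs', hch, heq⟩ := htent u (by rw [hov]; simp)
    have : qv = ov := by
      rw [hov] at heq; exact_mod_cast heq.symm
    subst this
    rw [hS]; exact gc_cost_le N road hN t1 _ _ hch
  have hrlt := rankV_lt (sbound N road) (lget ⊤ t1 u) nxt hn0 hnS hcond hob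
  have htl := tmu_lset (sbound N road) t1 u ((nxt : Int) : WithTop Int) hu0 hur
  rw [← ht2] at htl
  omega

-- ---- A's inner edge scan ----
theorem foldA_spec (N : Int) (road : List (Int × Int × Int)) (hPre : Pre5 N road)
    (v qc : Int) (hv : 0 ≤ v ∧ v ≤ N) :
    ∀ (todo : List (Int × Int × Int)), (∀ ed ∈ todo, ed ∈ road) →
    ∀ (t1 : List (WithTop Int)) (q1 : List (Int × Int)),
    t1.length = (N + 1).toNat → Tent N road t1 → (∃ vs, GC N road t1 (v :: vs) qc) →
    (todo.foldl (stepA v qc) (t1, q1)).1.length = (N + 1).toNat ∧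
    (∀ i, lget ⊤ (todo.foldl (stepA v qc) (t1, q1)).1 i ≤ lget ⊤ t1 i) ∧
    Tent N road (todo.foldl (stepA v qc) (t1, q1)).1 ∧
    (∃ ext, (todo.foldl (stepA v qc) (t1, q1)).2 = q1 ++ ext ∧
      (∀ p ∈ ext, ∃ vs, GC N road (todo.foldl (stepA v qc) (t1, q1)).1 (p.1 :: vs) p.2) ∧
      (∀ i, lget ⊤ (todo.foldl (stepA v qc) (t1, q1)).1 i = lget ⊤ t1 i ∨
        ∃ p ∈ ext, p.1 = i ∧ ((p.2 : Int) : WithTop Int) = lget ⊤ (todo.foldl (stepA v qc) (t1, q1)).1 i)) ∧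
    (∀ ed ∈ todo,
      (ed.1 = v → lget ⊤ (todo.foldl (stepA v qc) (t1, q1)).1 ed.2.1 ≤ ((qc + ed.2.2 : Int) : WithTop Int)) ∧
      (ed.2.1 = v → lget ⊤ (todo.foldl (stepA v qc) (t1, q1)).1 ed.1 ≤ ((qc + ed.2.2 : Int) : WithTop Int))) ∧
    2 * tmu (sbound N road) (todo.foldl (stepA v qc) (t1, q1)).1 + (todo.foldl (stepA v qc) (t1, q1)).2.length ≤
      2 * tmu (sbound N road) t1 + q1.length := by
  intro todo
  induction todo with
  | nil =>
    intro _ t1 q1 hlen htent hq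
    refine ⟨hlen, fun i => le_refl _, htent, ⟨[], by simp, by simp, fun i => Or.inl rfl⟩, by simp, by simp⟩
  | cons ed todo' ih =>
    intro hsub t1 q1 hlen htent hq
    obtain ⟨vs, hgc⟩ := hq
    have hedmem : ed ∈ road := hsub ed (by simp)
    have hsub' : ∀ e ∈ todo', e ∈ road := fun e he => hsub e (by simp [he])
    have hhead := gc_head_le N road t1 v vs qc hgc
    simp only [List.foldl_cons]
    by_cases h1 : (ed.1 == v && vlt ((qc + ed.2.2 : Int) : WithTop Int) (lget ⊤ t1 ed.2.1)) = true
    · -- first branch: relax ed.2.1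
      have hstep : stepA v qc (t1, q1) ed =
          (lset t1 ed.2.1 ((qc + ed.2.2 : Int) : WithTop Int), q1 ++ [(ed.2.1, qc + ed.2.2)]) := by
        simp only [stepA, h1, if_pos]
      obtain ⟨hev', hlt⟩ := Bool.and_eq_true_iff.mp h1
      have hev : ed.1 = v := beq_iff_eq.mp hev'
      have hcond : ((qc + ed.2.2 : Int) : WithTop Int) < lget ⊤ t1 ed.2.1 := (vlt_iff _ _).mp hlt
      have hadj : Adj road v ed.2.1 ed.2.2 := by
        left; rw [← hev]; exact hedmem
      have hact := adj_active N road hPre v ed.2.1 ed.2.2 hadj hv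
      obtain ⟨hl2, hm2, hself2, hch2, htent2, hmu2⟩ :=
        update_facts N road hPre.1 t1 hlen htent v qc vs hgc ed.2.1 ed.2.2 hadj hact.1 hact.2 hcond
      rw [hstep]
      set t2 := lset t1 ed.2.1 ((qc + ed.2.2 : Int) : WithTop Int) with ht2
      have hq2 : ∃ vs', GC N road t2 (v :: vs') qc := ⟨vs, gc_mono N road t1 t2 hm2 _ _ hgc⟩
      obtain ⟨HL, HM, HT, ⟨ext, hq2eq, hextgc, hwriter⟩, HR, HMU⟩ :=
        ih hsub' t2 (q1 ++ [(ed.2.1, qc + ed.2.2)]) (by omega) htent2 hq2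
      refine ⟨HL, fun i => le_trans (HM i) (hm2 i), HT,
        ⟨(ed.2.1, qc + ed.2.2) :: ext, by simpa using hq2eq, ?_, ?_⟩, ?_, ?_⟩
      · intro p hp
        rcases List.mem_cons.mp hp with hp1 | hp1
        · subst hp1
          exact ⟨v :: vs, gc_mono N road t2 _ HM _ _ hch2⟩
        · exact hextgc p hp1
      · intro i
        rcases hwriter i with hw | ⟨p, hp, hpi, hpe⟩
        · by_cases hi : i = ed.2.1
          · subst hi
            exact Or.inr ⟨(ed.2.1, qc + ed.2.2), by simp, rfl, by rw [hw, hself2]⟩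
          · exact Or.inl (by rw [hw, lget_lset_ne ⊤ t1 ed.2.1 i _ hi])
        · exact Or.inr ⟨p, by simp [hp], hpi, hpe⟩
      · intro e he
        rcases List.mem_cons.mp he with he1 | he1
        · rw [he1]
          refine ⟨fun _ => le_trans (HM _) (le_of_eq hself2), fun _ => ?_⟩
          calc lget ⊤ (todo'.foldl (stepA v qc) (t2, q1 ++ [(ed.2.1, qc + ed.2.2)])).1 ed.1
              ≤ lget ⊤ t2 ed.1 := HM _
            _ ≤ lget ⊤ t1 ed.1 := hm2 _
            _ = lget ⊤ t1 v := by rw [hev]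
            _ ≤ ((qc : Int) : WithTop Int) := hhead
            _ ≤ ((qc + ed.2.2 : Int) : WithTop Int) := by
                have := hact.2
                exact_mod_cast (by omega : qc ≤ qc + ed.2.2)
        · exact HR e he1
      · have : (q1 ++ [(ed.2.1, qc + ed.2.2)]).length = q1.length + 1 := by simp
        omega
    · by_cases h2 : (ed.2.1 == v && vlt ((qc + ed.2.2 : Int) : WithTop Int) (lget ⊤ t1 ed.1)) = true
      · -- second branch: relax ed.1
        have hstep : stepA v qc (t1, q1) ed =
            (lset t1 ed.1 ((qc + ed.2.2 : Int) : WithTop Int), q1 ++ [(ed.1, qc + ed.2.2)]) := by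
          simp only [stepA, h1, h2, if_pos, if_neg, Bool.not_eq_true]
        obtain ⟨hev', hlt⟩ := Bool.and_eq_true_iff.mp h2
        have hev : ed.2.1 = v := beq_iff_eq.mp hev'
        have hcond : ((qc + ed.2.2 : Int) : WithTop Int) < lget ⊤ t1 ed.1 := (vlt_iff _ _).mp hlt
        have hadj : Adj road v ed.1 ed.2.2 := by
          right; rw [← hev]; exact hedmem
        have hact := adj_active N road hPre v ed.1 ed.2.2 hadj hv
        obtain ⟨hl2, hm2, hself2, hch2, htent2, hmu2⟩ :=
          update_facts N road hPre.1 t1 hlen htent v qc vs hgc ed.1 ed.2.2 hadj hact.1 hact.2 hcond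
        rw [hstep]
        set t2 := lset t1 ed.1 ((qc + ed.2.2 : Int) : WithTop Int) with ht2
        have hq2 : ∃ vs', GC N road t2 (v :: vs') qc := ⟨vs, gc_mono N road t1 t2 hm2 _ _ hgc⟩
        obtain ⟨HL, HM, HT, ⟨ext, hq2eq, hextgc, hwriter⟩, HR, HMU⟩ :=
          ih hsub' t2 (q1 ++ [(ed.1, qc + ed.2.2)]) (by omega) htent2 hq2
        refine ⟨HL, fun i => le_trans (HM i) (hm2 i), HT,
          ⟨(ed.1, qc + ed.2.2) :: ext, by simpa using hq2eq, ?_, ?_⟩, ?_, ?_⟩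
        · intro p hp
          rcases List.mem_cons.mp hp with hp1 | hp1
          · subst hp1
            exact ⟨v :: vs, gc_mono N road t2 _ HM _ _ hch2⟩
          · exact hextgc p hp1
        · intro i
          rcases hwriter i with hw | ⟨p, hp, hpi, hpe⟩
          · by_cases hi : i = ed.1
            · subst hi
              exact Or.inr ⟨(ed.1, qc + ed.2.2), by simp, rfl, by rw [hw, hself2]⟩
            · exact Or.inl (by rw [hw, lget_lset_ne ⊤ t1 ed.1 i _ hi])
          · exact Or.inr ⟨p, by simp [hp], hpi, hpe⟩
        · intro e he
          rcases List.mem_cons.mp he with he1 | he1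
          · rw [he1]
            refine ⟨fun hv1 => ?_, fun _ => le_trans (HM _) (le_of_eq hself2)⟩
            -- branch 1 did not fire although ed.1 = v ⇒ table value already small
            have hnl : ¬ ((qc + ed.2.2 : Int) : WithTop Int) < lget ⊤ t1 ed.2.1 := by
              intro hcon
              exact h1 (by rw [Bool.and_eq_true]; exact ⟨beq_iff_eq.mpr hv1, (vlt_iff _ _).mpr hcon⟩)
            calc lget ⊤ (todo'.foldl (stepA v qc) (t2, q1 ++ [(ed.1, qc + ed.2.2)])).1 ed.2.1
                ≤ lget ⊤ t2 ed.2.1 := HM _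
              _ ≤ lget ⊤ t1 ed.2.1 := hm2 _
              _ ≤ ((qc + ed.2.2 : Int) : WithTop Int) := not_lt.mp hnl
          · exact HR e he1
        · have : (q1 ++ [(ed.1, qc + ed.2.2)]).length = q1.length + 1 := by simp
          omega
      · -- no relaxation on this edge
        have hstep : stepA v qc (t1, q1) ed = (t1, q1) := by
          simp only [stepA, h1, h2, if_neg, Bool.not_eq_true]
        rw [hstep]
        obtain ⟨HL, HM, HT, Hext, HR, HMU⟩ := ih hsub' t1 q1 hlen htent ⟨vs, hgc⟩
        refine ⟨HL, HM, HT, Hext, ?_, HMU⟩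
        intro e he
        rcases List.mem_cons.mp he with he1 | he1
        · rw [he1]
          constructor
          · intro hv1
            have hnl : ¬ ((qc + ed.2.2 : Int) : WithTop Int) < lget ⊤ t1 ed.2.1 := by
              intro hcon
              exact h1 (by rw [Bool.and_eq_true]; exact ⟨beq_iff_eq.mpr hv1, (vlt_iff _ _).mpr hcon⟩)
            exact le_trans (HM _) (not_lt.mp hnl)
          · intro hv2
            have hnl : ¬ ((qc + ed.2.2 : Int) : WithTop Int) < lget ⊤ t1 ed.1 := by
              intro hcon
              exact h2 (by rw [Bool.and_eq_true]; exact ⟨beq_iff_eq.mpr hv2, (vlt_iff _ _).mpr hcon⟩)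
            exact le_trans (HM _) (not_lt.mp hnl)
        · exact HR e he1

-- ---- A's outer loop ----
structure InvA (N : Int) (road : List (Int × Int × Int))
    (t : List (WithTop Int)) (q : List (Int × Int)) : Prop where
  len : t.length = (N + 1).toNat
  one : lget ⊤ t 1 ≤ ((0 : Int) : WithTop Int)
  tent : Tent N road t
  qent : ∀ p ∈ q, ∃ vs, GC N road t (p.1 :: vs) p.2
  main : ∀ v : Int, (∃ p ∈ q, p.1 = v ∧ ((p.2 : Int) : WithTop Int) ≤ lget ⊤ t v) ∨
    (∀ ed ∈ road, (ed.1 = v → lget ⊤ t ed.2.1 ≤ lget ⊤ t v + ((ed.2.2 : Int) : WithTop Int)) ∧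
      (ed.2.1 = v → lget ⊤ t ed.1 ≤ lget ⊤ t v + ((ed.2.2 : Int) : WithTop Int)))

theorem loopA_final (N : Int) (road : List (Int × Int × Int)) (hPre : Pre5 N road) :
    ∀ (fuel : Nat) (t : List (WithTop Int)) (q : List (Int × Int)),
    InvA N road t q → 2 * tmu (sbound N road) t + q.length < fuel →
    (loopA road fuel t q).length = (N + 1).toNat ∧
    lget ⊤ (loopA road fuel t q) 1 ≤ ((0 : Int) : WithTop Int) ∧
    FixT road (loopA road fuel t q) ∧ SoundT road (loopA road fuel t q) := by
  intro fuel
  induction fuel with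
  | zero => intro t q _ hf; omega
  | succ fuel ihf =>
    intro t q hinv hf
    cases hpop : popMin q with
    | none =>
      have hqnil := popMin_none q hpop
      have hres : loopA road (fuel + 1) t q = t := by
        simp only [loopA, hpop]
      rw [hres]
      refine ⟨hinv.len, hinv.one, ?_, ?_⟩
      · intro ed hed
        have hm1 := hinv.main ed.1
        have hm2 := hinv.main ed.2.1
        subst hqnil
        rcases hm1 with ⟨p, hp, _⟩ | hd1
        · simp at hp
        rcases hm2 with ⟨p, hp, _⟩ | hd2
        · simp at hp
        exact ⟨(hd1 ed hed).1 rfl, (hd2 ed hed).2 rfl⟩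
      · intro i hne
        obtain ⟨qv, vs, hch, heq⟩ := hinv.tent i hne
        exact ⟨qv, gc_reach N road t _ _ hch i vs rfl, heq⟩
    | some mq =>
      obtain ⟨⟨cur, qc⟩, q'⟩ := mq
      obtain ⟨hmem, hsubq, hkeep, hlq⟩ := popMin_spec q (cur, qc) q' hpop
      obtain ⟨vs, hchq⟩ := hinv.qent (cur, qc) hmem
      have hv : 0 ≤ cur ∧ cur ≤ N :=
        gc_mem_bounds N road hPre.1 t _ _ hchq cur (by simp)
      obtain ⟨HL, HM, HT, ⟨ext, hexteq, hextgc, hwriter⟩, HR, HMU⟩ :=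
        foldA_spec N road hPre cur qc hv road (fun ed h => h) t q' hinv.len hinv.tent ⟨vs, hchq⟩
      have hres : loopA road (fuel + 1) t q =
          loopA road fuel (road.foldl (stepA cur qc) (t, q')).1 (road.foldl (stepA cur qc) (t, q')).2 := by
        simp only [loopA, hpop]
      rw [hres]
      have hinv2 : InvA N road (road.foldl (stepA cur qc) (t, q')).1 (road.foldl (stepA cur qc) (t, q')).2 := by
        refine ⟨HL, le_trans (HM 1) hinv.one, HT, ?_, ?_⟩
        · intro p hp
          rw [hexteq] at hp
          rcases List.mem_append.mp hp with hp1 | hp1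
          · obtain ⟨vs', hch'⟩ := hinv.qent p (hsubq p hp1)
            exact ⟨vs', gc_mono N road t _ HM _ _ hch'⟩
          · exact hextgc p hp1
        · intro v
          rcases hwriter v with hunch | ⟨p, hp, hpi, hpe⟩
          · rcases hinv.main v with ⟨p, hpq, hp1, hple⟩ | hd2
            · by_cases hpm : p = (cur, qc)
              · -- popped entry was the up-to-date witness: relaxations establish disjunct 2
                right
                subst hpm
                simp only at hp1 hple
                subst hp1
                have hhead := gc_head_le N road t cur vs qc hchq
                have hqeq : lget ⊤ t cur = ((qc : Int) : WithTop Int) := le_antisymm hhead hple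
                intro ed hed
                constructor
                · intro hv1
                  have := (HR ed hed).1 hv1
                  rw [hunch, hqeq]
                  calc lget ⊤ (road.foldl (stepA cur qc) (t, q')).1 ed.2.1
                      ≤ ((qc + ed.2.2 : Int) : WithTop Int) := this
                    _ = ((qc : Int) : WithTop Int) + ((ed.2.2 : Int) : WithTop Int) := by push_cast; rfl
                · intro hv2
                  have := (HR ed hed).2 hv2
                  rw [hunch, hqeq]
                  calc lget ⊤ (road.foldl (stepA cur qc) (t, q')).1 ed.1
                      ≤ ((qc + ed.2.2 : Int) : WithTop Int) := this
                    _ = ((qc : Int) : WithTop Int) + ((ed.2.2 : Int) : WithTop Int) := by push_cast; rfl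
              · left
                refine ⟨p, ?_, hp1, by rw [hunch]; exact le_trans hple (le_refl _)⟩
                rw [hexteq]
                exact List.mem_append_left _ (hkeep p hpq hpm)
            · right
              intro ed hed
              refine ⟨fun hv1 => ?_, fun hv2 => ?_⟩
              · rw [hunch]
                exact le_trans (HM _) (le_trans ((hd2 ed hed).1 hv1) (le_refl _))
              · rw [hunch]
                exact le_trans (HM _) (le_trans ((hd2 ed hed).2 hv2) (le_refl _))
          · left
            refine ⟨p, ?_, hpi, le_of_eq hpe⟩
            rw [hexteq]
            exact List.mem_append_right _ hp
      exact ihf _ _ hinv2 (by omega)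

-- ---- adjacency-dict membership ----
theorem adjStep_mem (a : PySem.Dict Int (List (Int × Int))) (ed : Int × Int × Int) :
    ∀ v u c : Int, ((u, c) ∈ (adjStep a ed).getD v [] ↔
      (u, c) ∈ a.getD v [] ∨ (v = ed.1 ∧ u = ed.2.1 ∧ c = ed.2.2) ∨ (v = ed.2.1 ∧ u = ed.1 ∧ c = ed.2.2)) := by
  intro v u c
  unfold adjStep
  simp only [PySem.Dict.getD_insert]
  split_ifs with h1 h2 h2 <;> simp_all [List.mem_append, Prod.ext_iff] <;> tauto

theorem buildAdj_mem (N : Int) (road : List (Int × Int × Int)) :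
    ∀ v u c : Int, ((u, c) ∈ (buildAdj road).getD v [] ↔ Adj road v u c) := by
  have key : ∀ (todo : List (Int × Int × Int)) (a : PySem.Dict Int (List (Int × Int)))
      (P : Int → Int → Int → Prop),
      (∀ v u c : Int, ((u, c) ∈ a.getD v [] ↔ P v u c)) →
      (∀ v u c : Int, ((u, c) ∈ (todo.foldl adjStep a).getD v [] ↔
        P v u c ∨ (v, u, c) ∈ todo ∨ (u, v, c) ∈ todo)) := by
    intro todo
    induction todo with
    | nil =>
      intro a P hP v u c
      simp [hP v u c]
    | cons ed todo' ih =>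
      intro a P hP v u c
      simp only [List.foldl_cons]
      rw [ih (adjStep a ed)
        (fun v u c => P v u c ∨ (v = ed.1 ∧ u = ed.2.1 ∧ c = ed.2.2) ∨ (v = ed.2.1 ∧ u = ed.1 ∧ c = ed.2.2))
        (fun v u c => by rw [adjStep_mem a ed v u c, hP v u c]) v u c]
      constructor
      · rintro ((h | ⟨h1, h2, h3⟩ | ⟨h1, h2, h3⟩) | h | h)
        · exact Or.inl h
        · exact Or.inr (Or.inl (by simp [h1, h2, h3]))
        · exact Or.inr (Or.inr (by simp [h1, h2, h3]))
        · exact Or.inr (Or.inl (by simp [h]))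
        · exact Or.inr (Or.inr (by simp [h]))
      · rintro (h | h | h)
        · exact Or.inl (Or.inl h)
        · rcases List.mem_cons.mp h with h1 | h1
          · exact Or.inl (Or.inr (Or.inl ⟨by rw [← h1], by rw [← h1], by rw [← h1]⟩))
          · exact Or.inr (Or.inl h1)
        · rcases List.mem_cons.mp h with h1 | h1
          · exact Or.inl (Or.inr (Or.inr ⟨by rw [← h1], by rw [← h1], by rw [← h1]⟩))
          · exact Or.inr (Or.inr h1)
  intro v u c
  unfold buildAdj
  rw [key road PySem.Dict.empty (fun _ _ _ => False) (fun v u c => by simp) v u c]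
  unfold Adj
  simp

-- ---- B's inner neighbour scan ----
theorem foldB_spec (N : Int) (road : List (Int × Int × Int)) (hPre : Pre5 N road)
    (v qc : Int) (hv : 0 ≤ v ∧ v ≤ N) :
    ∀ (todo : List (Int × Int)), (∀ p ∈ todo, Adj road v p.1 p.2) →
    ∀ (t1 : List (WithTop Int)) (q1 : List (Int × Int)),
    t1.length = (N + 1).toNat → Tent N road t1 → (∃ vs, GC N road t1 (v :: vs) qc) →
    (todo.foldl (stepB qc) (t1, q1)).1.length = (N + 1).toNat ∧
    (∀ i, lget ⊤ (todo.foldl (stepB qc) (t1, q1)).1 i ≤ lget ⊤ t1 i) ∧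
    Tent N road (todo.foldl (stepB qc) (t1, q1)).1 ∧
    (∃ ext, (todo.foldl (stepB qc) (t1, q1)).2 = q1 ++ ext ∧
      (∀ p ∈ ext, ∃ vs, GC N road (todo.foldl (stepB qc) (t1, q1)).1 (p.2 :: vs) p.1) ∧
      (∀ i, lget ⊤ (todo.foldl (stepB qc) (t1, q1)).1 i = lget ⊤ t1 i ∨
        ∃ p ∈ ext, p.2 = i ∧ ((p.1 : Int) : WithTop Int) = lget ⊤ (todo.foldl (stepB qc) (t1, q1)).1 i)) ∧
    (∀ p ∈ todo, lget ⊤ (todo.foldl (stepB qc) (t1, q1)).1 p.1 ≤ ((qc + p.2 : Int) : WithTop Int)) ∧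
    2 * tmu (sbound N road) (todo.foldl (stepB qc) (t1, q1)).1 + (todo.foldl (stepB qc) (t1, q1)).2.length ≤
      2 * tmu (sbound N road) t1 + q1.length := by
  intro todo
  induction todo with
  | nil =>
    intro _ t1 q1 hlen htent hq
    refine ⟨hlen, fun i => le_refl _, htent, ⟨[], by simp, by simp, fun i => Or.inl rfl⟩, by simp, by simp⟩
  | cons pr todo' ih =>
    intro hadjs t1 q1 hlen htent hq
    obtain ⟨vs, hgc⟩ := hq
    have hadj : Adj road v pr.1 pr.2 := hadjs pr (by simp)
    have hadjs' : ∀ p ∈ todo', Adj road v p.1 p.2 := fun p hp => hadjs p (by simp [hp])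
    simp only [List.foldl_cons]
    by_cases h1 : vlt ((qc + pr.2 : Int) : WithTop Int) (lget ⊤ t1 pr.1) = true
    · have hstep : stepB qc (t1, q1) pr =
          (lset t1 pr.1 ((qc + pr.2 : Int) : WithTop Int), q1 ++ [(qc + pr.2, pr.1)]) := by
        simp only [stepB, h1, if_pos]
      have hcond : ((qc + pr.2 : Int) : WithTop Int) < lget ⊤ t1 pr.1 := (vlt_iff _ _).mp h1
      have hact := adj_active N road hPre v pr.1 pr.2 hadj hv
      obtain ⟨hl2, hm2, hself2, hch2, htent2, hmu2⟩ :=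
        update_facts N road hPre.1 t1 hlen htent v qc vs hgc pr.1 pr.2 hadj hact.1 hact.2 hcond
      rw [hstep]
      set t2 := lset t1 pr.1 ((qc + pr.2 : Int) : WithTop Int) with ht2
      have hq2 : ∃ vs', GC N road t2 (v :: vs') qc := ⟨vs, gc_mono N road t1 t2 hm2 _ _ hgc⟩
      obtain ⟨HL, HM, HT, ⟨ext, hexteq, hextgc, hwriter⟩, HR, HMU⟩ :=
        ih hadjs' t2 (q1 ++ [(qc + pr.2, pr.1)]) (by omega) htent2 hq2
      refine ⟨HL, fun i => le_trans (HM i) (hm2 i), HT,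
        ⟨(qc + pr.2, pr.1) :: ext, by simpa using hexteq, ?_, ?_⟩, ?_, ?_⟩
      · intro p hp
        rcases List.mem_cons.mp hp with hp1 | hp1
        · subst hp1
          exact ⟨v :: vs, gc_mono N road t2 _ HM _ _ hch2⟩
        · exact hextgc p hp1
      · intro i
        rcases hwriter i with hw | ⟨p, hp, hpi, hpe⟩
        · by_cases hi : i = pr.1
          · subst hi
            exact Or.inr ⟨(qc + pr.2, pr.1), by simp, rfl, by rw [hw, hself2]⟩
          · exact Or.inl (by rw [hw, lget_lset_ne ⊤ t1 pr.1 i _ hi])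
        · exact Or.inr ⟨p, by simp [hp], hpi, hpe⟩
      · intro p hp
        rcases List.mem_cons.mp hp with hp1 | hp1
        · rw [hp1]
          exact le_trans (HM _) (le_of_eq hself2)
        · exact HR p hp1
      · have : (q1 ++ [(qc + pr.2, pr.1)]).length = q1.length + 1 := by simp
        omega
    · have hstep : stepB qc (t1, q1) pr = (t1, q1) := by
        simp only [stepB, h1, if_neg, Bool.not_eq_true]
      rw [hstep]
      obtain ⟨HL, HM, HT, Hext, HR, HMU⟩ := ih hadjs' t1 q1 hlen htent ⟨vs, hgc⟩
      refine ⟨HL, HM, HT, Hext, ?_, HMU⟩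
      intro p hp
      rcases List.mem_cons.mp hp with hp1 | hp1
      · rw [hp1]
        have hnl : ¬ ((qc + pr.2 : Int) : WithTop Int) < lget ⊤ t1 pr.1 := by
          intro hcon
          exact h1 ((vlt_iff _ _).mpr hcon)
        exact le_trans (HM _) (not_lt.mp hnl)
      · exact HR p hp1

-- ---- B's outer loop ----
structure InvB (N : Int) (road : List (Int × Int × Int))
    (t : List (WithTop Int)) (q : List (Int × Int)) : Prop where
  len : t.length = (N + 1).toNat
  one : lget ⊤ t 1 ≤ ((0 : Int) : WithTop Int)
  tent : Tent N road t
  qent : ∀ p ∈ q, ∃ vs, GC N road t (p.2 :: vs) p.1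
  main : ∀ v : Int, (∃ p ∈ q, p.2 = v ∧ ((p.1 : Int) : WithTop Int) ≤ lget ⊤ t v) ∨
    (∀ ed ∈ road, (ed.1 = v → lget ⊤ t ed.2.1 ≤ lget ⊤ t v + ((ed.2.2 : Int) : WithTop Int)) ∧
      (ed.2.1 = v → lget ⊤ t ed.1 ≤ lget ⊤ t v + ((ed.2.2 : Int) : WithTop Int)))

theorem loopB_final (N : Int) (road : List (Int × Int × Int)) (hPre : Pre5 N road) :
    ∀ (fuel : Nat) (t : List (WithTop Int)) (q : List (Int × Int)),
    InvB N road t q → 2 * tmu (sbound N road) t + q.length < fuel →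
    (loopB (buildAdj road) fuel t q).length = (N + 1).toNat ∧
    lget ⊤ (loopB (buildAdj road) fuel t q) 1 ≤ ((0 : Int) : WithTop Int) ∧
    FixT road (loopB (buildAdj road) fuel t q) ∧ SoundT road (loopB (buildAdj road) fuel t q) := by
  have hadjmem := buildAdj_mem N road
  intro fuel
  induction fuel with
  | zero => intro t q _ hf; omega
  | succ fuel ihf =>
    intro t q hinv hf
    cases hpop : popMin q with
    | none =>
      have hqnil := popMin_none q hpop
      have hres : loopB (buildAdj road) (fuel + 1) t q = t := by
        simp only [loopB, hpop]
      rw [hres]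
      refine ⟨hinv.len, hinv.one, ?_, ?_⟩
      · intro ed hed
        have hm1 := hinv.main ed.1
        have hm2 := hinv.main ed.2.1
        subst hqnil
        rcases hm1 with ⟨p, hp, _⟩ | hd1
        · simp at hp
        rcases hm2 with ⟨p, hp, _⟩ | hd2
        · simp at hp
        exact ⟨(hd1 ed hed).1 rfl, (hd2 ed hed).2 rfl⟩
      · intro i hne
        obtain ⟨qv, vs, hch, heq⟩ := hinv.tent i hne
        exact ⟨qv, gc_reach N road t _ _ hch i vs rfl, heq⟩
    | some mq =>
      obtain ⟨⟨d, v⟩, q'⟩ := mq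
      obtain ⟨hmem, hsubq, hkeep, hlq⟩ := popMin_spec q (d, v) q' hpop
      obtain ⟨vs, hchq⟩ := hinv.qent (d, v) hmem
      have hv : 0 ≤ v ∧ v ≤ N :=
        gc_mem_bounds N road hPre.1 t _ _ hchq v (by simp)
      by_cases hstale : vlt (lget ⊤ t v) ((d : Int) : WithTop Int) = true
      · -- stale entry: skipped
        have hres : loopB (buildAdj road) (fuel + 1) t q = loopB (buildAdj road) fuel t q' := by
          simp only [loopB, hpop, hstale, if_pos]
        rw [hres]
        have hlt : lget ⊤ t v < ((d : Int) : WithTop Int) := (vlt_iff _ _).mp hstale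
        have hinv2 : InvB N road t q' := by
          refine ⟨hinv.len, hinv.one, hinv.tent, fun p hp => hinv.qent p (hsubq p hp), ?_⟩
          intro w
          rcases hinv.main w with ⟨p, hpq, hp2, hple⟩ | hd2
          · left
            refine ⟨p, ?_, hp2, hple⟩
            apply hkeep p hpq
            intro hpm
            rw [hpm] at hple hp2
            simp only at hple hp2
            rw [← hp2] at hple
            exact absurd hple (not_le.mpr hlt)
          · exact Or.inr hd2
        exact ihf t q' hinv2 (by omega)
      · -- up-to-date entry: relax all neighbours
        have hd : lget ⊤ t v = ((d : Int) : WithTop Int) := by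
          have h1 := gc_head_le N road t v vs d hchq
          have h2 : ¬ lget ⊤ t v < ((d : Int) : WithTop Int) := by
            intro hcon
            exact hstale ((vlt_iff _ _).mpr hcon)
          exact le_antisymm h1 (not_lt.mp h2)
        have hadjs : ∀ p ∈ (buildAdj road).getD v [], Adj road v p.1 p.2 := by
          intro p hp
          exact (hadjmem v p.1 p.2).mp hp
        obtain ⟨HL, HM, HT, ⟨ext, hexteq, hextgc, hwriter⟩, HR, HMU⟩ :=
          foldB_spec N road hPre v d hv ((buildAdj road).getD v []) hadjs t q' hinv.len hinv.tent ⟨vs, hchq⟩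
        have hres : loopB (buildAdj road) (fuel + 1) t q =
            loopB (buildAdj road) fuel (((buildAdj road).getD v []).foldl (stepB d) (t, q')).1
              (((buildAdj road).getD v []).foldl (stepB d) (t, q')).2 := by
          simp only [loopB, hpop, hstale, if_neg, Bool.not_eq_true]
        rw [hres]
        have hinv2 : InvB N road (((buildAdj road).getD v []).foldl (stepB d) (t, q')).1
            (((buildAdj road).getD v []).foldl (stepB d) (t, q')).2 := by
          refine ⟨HL, le_trans (HM 1) hinv.one, HT, ?_, ?_⟩
          · intro p hp
            rw [hexteq] at hp
            rcases List.mem_append.mp hp with hp1 | hp1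
            · obtain ⟨vs', hch'⟩ := hinv.qent p (hsubq p hp1)
              exact ⟨vs', gc_mono N road t _ HM _ _ hch'⟩
            · exact hextgc p hp1
          · intro w
            rcases hwriter w with hunch | ⟨p, hp, hpi, hpe⟩
            · rcases hinv.main w with ⟨p, hpq, hp2, hple⟩ | hd2
              · by_cases hpm : p = (d, v)
                · -- the popped entry was the up-to-date witness: w = v, disjunct 2 now holds
                  right
                  rw [hpm] at hp2 hple
                  simp only at hp2 hple
                  subst hp2
                  intro ed hed
                  constructor
                  · intro hv1
                    have hmem2 : ((ed.2.1, ed.2.2) : Int × Int) ∈ (buildAdj road).getD v [] := by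
                      apply (hadjmem v ed.2.1 ed.2.2).mpr
                      left; rw [← hv1]; exact hed
                    have := HR (ed.2.1, ed.2.2) hmem2
                    rw [hunch, hd]
                    calc lget ⊤ (((buildAdj road).getD v []).foldl (stepB d) (t, q')).1 ed.2.1
                        ≤ ((d + ed.2.2 : Int) : WithTop Int) := this
                      _ = ((d : Int) : WithTop Int) + ((ed.2.2 : Int) : WithTop Int) := by push_cast; rfl
                  · intro hv2
                    have hmem2 : ((ed.1, ed.2.2) : Int × Int) ∈ (buildAdj road).getD v [] := by
                      apply (hadjmem v ed.1 ed.2.2).mpr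
                      right; rw [← hv2]; exact hed
                    have := HR (ed.1, ed.2.2) hmem2
                    rw [hunch, hd]
                    calc lget ⊤ (((buildAdj road).getD v []).foldl (stepB d) (t, q')).1 ed.1
                        ≤ ((d + ed.2.2 : Int) : WithTop Int) := this
                      _ = ((d : Int) : WithTop Int) + ((ed.2.2 : Int) : WithTop Int) := by push_cast; rfl
                · left
                  refine ⟨p, ?_, hp2, by rw [hunch]; exact hple⟩
                  rw [hexteq]
                  exact List.mem_append_left _ (hkeep p hpq hpm)
              · right
                intro ed hed
                refine ⟨fun hv1 => ?_, fun hv2 => ?_⟩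
                · rw [hunch]
                  exact le_trans (HM _) ((hd2 ed hed).1 hv1)
                · rw [hunch]
                  exact le_trans (HM _) ((hd2 ed hed).2 hv2)
            · left
              refine ⟨p, ?_, hpi, le_of_eq hpe⟩
              rw [hexteq]
              exact List.mem_append_right _ hp
        exact ihf _ _ hinv2 (by omega)

-- ---- initial state and final assembly ----
theorem lget_init (N : Int) (hN : 1 ≤ N) (i : Int) :
    lget ⊤ (lset (List.replicate (N + 1).toNat (⊤ : WithTop Int)) 1 ((0 : Int) : WithTop Int)) i =
      if i = 1 then ((0 : Int) : WithTop Int) else ⊤ := by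
  have hr : (1 : Int).toNat < (List.replicate (N + 1).toNat (⊤ : WithTop Int)).length := by
    simp; omega
  by_cases hi : i = 1
  · subst hi
    rw [lget_lset_self ⊤ _ 1 _ (by omega) hr]
    simp
  · rw [lget_lset_ne ⊤ _ 1 i _ hi, lget_replicate]
    simp [hi]

theorem init_len (N : Int) :
    (lset (List.replicate (N + 1).toNat (⊤ : WithTop Int)) 1 ((0 : Int) : WithTop Int)).length
      = (N + 1).toNat := by
  rw [lset_length]; simp

theorem init_gc (N : Int) (road : List (Int × Int × Int)) (hN : 1 ≤ N) :
    GC N road (lset (List.replicate (N + 1).toNat (⊤ : WithTop Int)) 1 ((0 : Int) : WithTop Int)) [1] 0 := by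
  apply GC.base
  rw [lget_init N hN 1]
  simp

theorem init_tent (N : Int) (road : List (Int × Int × Int)) (hN : 1 ≤ N) :
    Tent N road (lset (List.replicate (N + 1).toNat (⊤ : WithTop Int)) 1 ((0 : Int) : WithTop Int)) := by
  intro i hne
  rw [lget_init N hN i] at hne ⊢
  by_cases hi : i = 1
  · subst hi
    refine ⟨0, [], init_gc N road hN, by simp⟩
  · simp [hi] at hne
                   
theorem init_fuel (N : Int) (road : List (Int × Int × Int)) (hN : 1 ≤ N) :
    2 * tmu (sbound N road) (lset (List.replicate (N + 1).toNat (⊤ : WithTop Int)) 1 ((0 : Int) : WithTop Int)) + 1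
      < fuelN N road := by
  have h1 := tmu_le (sbound N road) (lset (List.replicate (N + 1).toNat (⊤ : WithTop Int)) 1 ((0 : Int) : WithTop Int))
  rw [init_len N] at h1
  have h2 : (N + 1).toNat = N.toNat + 1 := by omega
  unfold fuelN
  have h4 : (N + 1).toNat * (sbound N road + 1) = (N.toNat + 1) * (sbound N road + 1) := by rw [h2]
  have h3 : (N.toNat + 2) * (sbound N road + 2)
      = (N.toNat + 1) * (sbound N road + 1) + (N.toNat + sbound N road + 3) := by ring
  omega

-- ---- the no-road-at-node-1 case: both loops stop after the first pop ----
theorem popMin_single (p : Int × Int) : popMin [p] = some (p, []) := by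
  simp [popMin, qmin, qremove]

theorem foldA_noop (road : List (Int × Int × Int)) :
    ∀ (todo : List (Int × Int × Int)) (st : List (WithTop Int) × List (Int × Int)),
    (∀ ed ∈ todo, ed.1 ≠ 1 ∧ ed.2.1 ≠ 1) → todo.foldl (stepA 1 0) st = st := by
  intro todo
  induction todo with
  | nil => intro st _; rfl
  | cons ed todo' ih =>
    intro st hno
    have h1 : (ed.1 == (1 : Int)) = false := by
      simpa using (hno ed (by simp)).1
    have h2 : (ed.2.1 == (1 : Int)) = false := by
      simpa using (hno ed (by simp)).2
    simp only [List.foldl_cons, stepA, h1, h2, Bool.false_and, if_neg, Bool.false_eq_true,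
      not_false_iff]
    exact ih st (fun e he => hno e (by simp [he]))

theorem getD_buildAdj_one (road : List (Int × Int × Int))
    (hno : ∀ ed ∈ road, ed.1 ≠ 1 ∧ ed.2.1 ≠ 1) :
    (buildAdj road).getD 1 [] = [] := by
  have key : ∀ (todo : List (Int × Int × Int)) (a : PySem.Dict Int (List (Int × Int))),
      (∀ ed ∈ todo, ed.1 ≠ 1 ∧ ed.2.1 ≠ 1) → a.getD 1 [] = [] →
      (todo.foldl adjStep a).getD 1 [] = [] := by
    intro todo
    induction todo with
    | nil => intro a _ h; exact h
    | cons ed todo' ih =>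
      intro a hno' ha
      simp only [List.foldl_cons]
      apply ih (adjStep a ed) (fun e he => hno' e (by simp [he]))
      unfold adjStep
      rw [PySem.Dict.getD_insert, if_neg (Ne.symm (hno' ed (by simp)).2),
        PySem.Dict.getD_insert, if_neg (Ne.symm (hno' ed (by simp)).1)]
      exact ha
  exact key road PySem.Dict.empty hno (by simp)

theorem noone_eq (N : Int) (road : List (Int × Int × Int)) (K : Int) (hN : 1 ≤ N)
    (hno : ∀ ed ∈ road, ed.1 ≠ 1 ∧ ed.2.1 ≠ 1) :
    solution N road K = solution_alt N road K := by
  set t0 := lset (List.replicate (N + 1).toNat (⊤ : WithTop Int)) 1 ((0 : Int) : WithTop Int) with ht0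
  obtain ⟨f, hf⟩ : ∃ f, fuelN N road = f + 2 := ⟨fuelN N road - 2, by unfold fuelN; omega⟩
  have hA : loopA road (fuelN N road) t0 [(1, 0)] = t0 := by
    rw [hf]
    have h1 : loopA road (f + 1 + 1) t0 [(1, 0)] = loopA road (f + 1) t0 [] := by
      simp only [loopA, popMin_single]
      rw [foldA_noop road road (t0, []) hno]
    rw [h1]
    simp [loopA, popMin]
  have hB : loopB (buildAdj road) (fuelN N road) t0 [(0, 1)] = t0 := by
    rw [hf]
    have hstale : vlt (lget ⊤ t0 1) ((0 : Int) : WithTop Int) = false := by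
      rw [lget_init N hN 1]
      simp [vlt]
    have h1 : loopB (buildAdj road) (f + 1 + 1) t0 [(0, 1)] = loopB (buildAdj road) (f + 1) t0 [] := by
      simp only [loopB, popMin_single, hstale, Bool.false_eq_true, if_neg, not_false_iff]
      rw [getD_buildAdj_one road hno]
      rfl
    rw [h1]
    simp [loopB, popMin]
  have e1 : solution N road K =
      (((loopA road (fuelN N road) t0 [(1, 0)]).filter (fun i => vle i (K : WithTop Int))).length : Int) := by
    simp only [solution]
    rfl
  have e2 : solution_alt N road K =
      (loopB (buildAdj road) (fuelN N road) t0 [(0, 1)]).foldl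
        (fun (acc : Int) x => if vle x (K : WithTop Int) then acc + 1 else acc) 0 := by
    simp only [solution_alt]
    rfl
  rw [e1, e2, hA, hB, count_eq (K : WithTop Int) t0]

theorem solution_eq_filter (N : Int) (road : List (Int × Int × Int)) (K : Int)
    (hPre : Pre5 N road) :
    ∃ T : List (WithTop Int),
      solution N road K = (((T.filter (fun i => vle i (K : WithTop Int))).length : Nat) : Int) ∧
      solution_alt N road K = (((T.filter (fun i => vle i (K : WithTop Int))).length : Nat) : Int) := by
  have hN := hPre.1
  set t0 := lset (List.replicate (N + 1).toNat (⊤ : WithTop Int)) 1 ((0 : Int) : WithTop Int) with ht0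
  have hone : lget ⊤ t0 1 ≤ ((0 : Int) : WithTop Int) := le_of_eq (by rw [lget_init N hN 1]; simp)
  have hone2 : ((0 : Int) : WithTop Int) ≤ lget ⊤ t0 1 := le_of_eq (by rw [lget_init N hN 1]; simp)
  have htop : ∀ i : Int, i ≠ 1 → lget ⊤ t0 i = ⊤ := by
    intro i hi; rw [lget_init N hN i]; simp [hi]
  have hmainA : InvA N road t0 [(1, 0)] := by
    refine ⟨init_len N, hone, init_tent N road hN, ?_, ?_⟩
    · intro p hp
      simp only [List.mem_singleton] at hp
      subst hp
      exact ⟨[], init_gc N road hN⟩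
    · intro v
      by_cases hv : v = 1
      · subst hv
        exact Or.inl ⟨(1, 0), by simp, rfl, hone2⟩
      · right
        intro ed hed
        constructor
        · intro _; rw [htop v hv]; simp
        · intro _; rw [htop v hv]; simp
  have hmainB : InvB N road t0 [(0, 1)] := by
    refine ⟨init_len N, hone, init_tent N road hN, ?_, ?_⟩
    · intro p hp
      simp only [List.mem_singleton] at hp
      subst hp
      exact ⟨[], init_gc N road hN⟩
    · intro v
      by_cases hv : v = 1
      · subst hv
        exact Or.inl ⟨(0, 1), by simp, rfl, hone2⟩
      · right
        intro ed hed
        constructor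
        · intro _; rw [htop v hv]; simp
        · intro _; rw [htop v hv]; simp
  obtain ⟨hA1, hA2, hA3, hA4⟩ :=
    loopA_final N road hPre (fuelN N road) t0 [(1, 0)] hmainA (by simpa using init_fuel N road hN)
  obtain ⟨hB1, hB2, hB3, hB4⟩ :=
    loopB_final N road hPre (fuelN N road) t0 [(0, 1)] hmainB (by simpa using init_fuel N road hN)
  have hTeq : loopA road (fuelN N road) t0 [(1, 0)] =
      loopB (buildAdj road) (fuelN N road) t0 [(0, 1)] := by
    apply eq_of_char road _ _ (by rw [hA1, hB1]) hA4 hB4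
    · exact reach_lower road _ hA3 hA2
    · exact reach_lower road _ hB3 hB2
  refine ⟨loopA road (fuelN N road) t0 [(1, 0)], ?_, ?_⟩
  · simp only [solution]
    rfl
  · simp only [solution_alt]
    rw [← ht0]
    rw [← hTeq]
    exact count_eq (K : WithTop Int) _

-- ===== VERDICT (by name: the statement is the Claim_ definition above) =====
theorem solution_spec : Claim_equal_solution := by
  intro N road K _ hPre
  unfold Spec_solution
  obtain ⟨hN, hor⟩ := hPre
  rcases hor with hgood | hno
  · obtain ⟨T, hA, hB⟩ := solution_eq_filter N road K ⟨hN, hgood⟩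
    rw [hA, hB]
  · exact noone_eq N road K hN hno
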